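-- pv_equiv track=rewrite | github.com/falvey20/HackerRank | Medium/Organizing Containers of Balls/solution.py | organizingContainers
-- ===== SOURCE A (Python) =====
-- def organizingContainers(container):
--     # total balls in each bucket
--     balls_in_each_bucket = [sum(i) for i in container]
--     # total balls of each colour
--     total_of_each_colour = []
--     for i in range(len(container)):
--         count = 0
--         for j in range(len(container)):
--             count += container[j][i]
--         total_of_each_colour.append(count)
--
--     if sorted(balls_in_each_bucket) == sorted(total_of_each_colour):
--         return "Possible"
--     return "Impossible"
-- ===== SOURCE B (Python) =====
-- def organizingContainers(container):
--     # running elementwise column accumulator, one pass over the rows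
--     cols = [0] * len(container)
--     for r in container:
--         cols = [c + v for c, v in zip(cols, r)]
--     # greedily match each bucket total against the remaining colour totals
--     for r in container:
--         s = sum(r)
--         if s in cols:
--             cols.remove(s)
--         else:
--             return "Impossible"
--     return "Possible"
-- ===== Notes on version B (the rewrite author's own statement) =====
-- stated objective: alternative
-- what changed: B drops A's staged row-sum list, index-based nested column loop and sorted()==sorted() comparison: it keeps a running elementwise column accumulator over one pass of the rows, then greedily matches each bucket total against the remaining column totals by removing its first occurrence, returning Impossible as soon as one total has no match.
import Mathlib
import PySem

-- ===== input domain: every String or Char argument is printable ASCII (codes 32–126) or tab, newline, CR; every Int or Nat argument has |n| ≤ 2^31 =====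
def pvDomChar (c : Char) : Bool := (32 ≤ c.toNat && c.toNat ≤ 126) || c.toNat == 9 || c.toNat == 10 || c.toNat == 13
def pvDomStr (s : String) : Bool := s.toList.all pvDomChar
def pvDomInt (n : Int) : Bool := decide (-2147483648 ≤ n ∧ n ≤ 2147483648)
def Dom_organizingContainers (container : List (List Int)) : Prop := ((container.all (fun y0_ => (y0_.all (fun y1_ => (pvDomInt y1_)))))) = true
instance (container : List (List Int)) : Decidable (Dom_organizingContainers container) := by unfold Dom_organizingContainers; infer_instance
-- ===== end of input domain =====

-- B replaces A's staged row-sum/column-sum aggregates and double-sort comparison with a running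
-- elementwise column accumulator and a greedy matching pass that consumes one remaining column
-- total per bucket total, with early exit (objective: alternative).
-- ===== PORT A =====
-- 'container[j][i]' is ported with pyGetD; Pre_ guarantees both indices are in range, so the
-- default is never consulted on admitted inputs (on excluded short-row inputs Python raises).
def organizingContainers (container : List (List Int)) : String :=
  let ballsInEachBucket := container.map (fun i => i.sum)
  let totalOfEachColour := (PySem.List.pyRange 0 (container.length : Int)).foldl
    (fun acc i =>
      let count := (PySem.List.pyRange 0 (container.length : Int)).foldl
        (fun c j => c + PySem.List.pyGetD (PySem.List.pyGetD container j []) i 0) 0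
      acc ++ [count]) []
  if PySem.List.sorted ballsInEachBucket (fun x => x) =
     PySem.List.sorted totalOfEachColour (fun x => x) then "Possible" else "Impossible"

-- ===== PORT B =====
-- Source B's second loop with its early 'return "Impossible"': structural recursion over the rows;
-- 'cols.remove(s)' after an 'in' check = erase first occurrence (exact for Int)
def pvMatch (rows : List (List Int)) (cols : List Int) : String :=
  match rows with
  | [] => "Possible"
  | r :: rest =>
    let s := r.sum
    if s ∈ cols then pvMatch rest (cols.erase s) else "Impossible"

def organizingContainers_alt (container : List (List Int)) : String :=
  let cols := container.foldl
    (fun cols r => List.zipWith (fun c v => c + v) cols r)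
    (List.replicate container.length 0)
  pvMatch container cols

-- ===== PRECONDITION & SPEC =====
-- Pre_ excludes exactly the inputs where A raises IndexError: a row shorter than the number of
-- containers (A's column loop reads container[j][i] for all i,j < n); rows may be longer.
def Pre_organizingContainers (container : List (List Int)) : Prop :=
  ∀ row ∈ container, container.length ≤ row.length
instance (container : List (List Int)) : Decidable (Pre_organizingContainers container) := by
  unfold Pre_organizingContainers; infer_instance
def pvWitness_organizingContainers : List (List Int) := [[1, 1], [1, 1]]

def Spec_organizingContainers (container : List (List Int)) (out : String) : Prop :=
  out = organizingContainers_alt container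
instance (container : List (List Int)) (out : String) : Decidable (Spec_organizingContainers container out) := by
  unfold Spec_organizingContainers; infer_instance

-- ===== CLAIM (what is proved, stated in full; the proofs are below) =====
def Claim_equal_organizingContainers : Prop := ∀ (container : List (List Int)), Dom_organizingContainers container → Pre_organizingContainers container → Spec_organizingContainers container (organizingContainers container)

-- ===== LEMMAS AND PROOFS =====

-- the column-sum list both programs compute (first n entries of each row; rows may be longer)
def pvColSums (container : List (List Int)) : List Int :=
  (List.range container.length).map (fun i => (container.map (fun row => row.getD i 0)).sum)

-- A's nested index loop produces exactly the column sums
theorem pvA_cols (container : List (List Int)) :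
    (PySem.List.pyRange 0 (container.length : Int)).foldl
      (fun acc i =>
        acc ++ [(PySem.List.pyRange 0 (container.length : Int)).foldl
          (fun c j => c + PySem.List.pyGetD (PySem.List.pyGetD container j []) i 0) 0]) []
      = pvColSums container := by
  rw [PySem.List.foldl_append_singleton_eq_map, PySem.List.pyRange_zero_natCast, List.map_map]
  unfold pvColSums
  apply List.map_congr_left
  intro i _
  simp only [Function.comp]
  rw [PySem.List.foldl_add, List.map_map]
  simp only [PySem.List.pyGetD_natCast, zero_add]
  congr 1
  refine List.ext_getElem (by simp) ?_
  intro j h1 h2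
  simp at h1
  simp [h1]

-- B's running column accumulator, pointwise (rows at least as long as the accumulator)
theorem pvFoldZip_getD (rows : List (List Int)) : ∀ (cols : List Int),
    (∀ r ∈ rows, cols.length ≤ r.length) →
    (rows.foldl (fun c r => List.zipWith (fun c v => c + v) c r) cols).length = cols.length ∧
    ∀ i < cols.length, (rows.foldl (fun c r => List.zipWith (fun c v => c + v) c r) cols).getD i 0
          = cols.getD i 0 + (rows.map (fun r => r.getD i 0)).sum := by
  induction rows with
  | nil => intro cols _; simp
  | cons r rest ih =>
    intro cols h
    have hr : cols.length ≤ r.length := h r (by simp)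
    have hlen : (List.zipWith (fun c v => c + v) cols r).length = cols.length := by
      simp [List.length_zipWith]; omega
    have hrec := ih (List.zipWith (fun c v => c + v) cols r)
      (by intro x hx; rw [hlen]; exact h x (by simp [hx]))
    refine ⟨by simp [List.foldl_cons, hrec.1, hlen], ?_⟩
    intro i hi
    simp only [List.foldl_cons, List.map_cons, List.sum_cons]
    rw [hrec.2 i (by omega)]
    have hir : i < r.length := by omega
    have hzip : (List.zipWith (fun c v => c + v) cols r).getD i 0 = cols.getD i 0 + r.getD i 0 := by
      simp [List.getD_eq_getElem?_getD, hi, hir]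
    rw [hzip]; ring

-- B's column accumulator equals the column-sum list
theorem pvB_cols (container : List (List Int))
    (h : ∀ row ∈ container, container.length ≤ row.length) :
    container.foldl (fun c r => List.zipWith (fun c v => c + v) c r)
      (List.replicate container.length 0) = pvColSums container := by
  have hh : ∀ r ∈ container, (List.replicate container.length (0:Int)).length ≤ r.length := by
    simpa using h
  obtain ⟨hlen, hget⟩ := pvFoldZip_getD container _ hh
  refine List.ext_getElem (by simp [hlen, pvColSums]) ?_
  intro i h1 h2
  have hi : i < container.length := by simpa [hlen] using h1
  have := hget i (by simpa using hi)
  rw [List.getD_eq_getElem?_getD, List.getElem?_eq_getElem h1] at this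
  simp only [Option.getD_some] at this
  rw [this]
  simp only [pvColSums]
  rw [List.getElem_map]
  simp only [List.getElem_range]
  simp [List.getD_eq_getElem?_getD, hi]

-- matching against a multiset: pull off the head and erase its match
theorem pvSubperm_cons_erase (a : Int) (t l : List Int) (h : a ∈ l) :
    List.Subperm (a :: t) l ↔ List.Subperm t (l.erase a) := by
  rw [(List.perm_cons_erase h).subperm_left, List.subperm_cons]

-- a subpermutation between lists of equal length is a permutation
theorem pvSubperm_perm (l₁ l₂ : List Int) (h : List.Subperm l₁ l₂)
    (hl : l₂.length ≤ l₁.length) : l₁.Perm l₂ := by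
  obtain ⟨l, hp, hs⟩ := h
  have hll : l.length = l₁.length := hp.length_eq
  have hle : l.length = l₂.length := le_antisymm hs.length_le (by omega)
  rw [← hs.eq_of_length hle]
  exact hp.symm

-- the greedy matching pass succeeds exactly when the bucket totals embed into the colour totals
theorem pvMatch_possible (rows : List (List Int)) : ∀ (cols : List Int),
    pvMatch rows cols = "Possible" ↔ List.Subperm (rows.map (fun r => r.sum)) cols := by
  induction rows with
  | nil => intro cols; simp [pvMatch, List.nil_subperm]
  | cons r rest ih =>
    intro cols
    simp only [pvMatch, List.map_cons]
    by_cases h : r.sum ∈ cols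
    · rw [if_pos h, ih, pvSubperm_cons_erase _ _ _ h]
    · rw [if_neg h]
      constructor
      · intro hc; exact absurd hc (by decide)
      · intro hs; exact absurd (hs.subset (by simp)) h

theorem pvMatch_impossible (rows : List (List Int)) : ∀ (cols : List Int),
    pvMatch rows cols ≠ "Possible" → pvMatch rows cols = "Impossible" := by
  induction rows with
  | nil => intro cols h; exact absurd rfl h
  | cons r rest ih =>
    intro cols h
    simp only [pvMatch] at h ⊢
    by_cases hm : r.sum ∈ cols
    · rw [if_pos hm] at h ⊢; exact ih _ h
    · rw [if_neg hm]

-- A's verdict condition is multiset equality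
theorem pvSorted_eq_iff (as bs : List Int) :
    (PySem.List.sorted as (fun x => x) = PySem.List.sorted bs (fun x => x)) ↔ as.Perm bs := by
  constructor
  · intro h
    exact ((PySem.List.sorted_perm as (fun x => x) false).symm.trans
      (h ▸ PySem.List.sorted_perm bs (fun x => x) false))
  · intro h
    refine List.Perm.eq_of_pairwise (le := fun a b : Int => a ≤ b)
      (fun a b _ _ h1 h2 => by omega)
      (PySem.List.sorted_pairwise as (fun x => x)) (PySem.List.sorted_pairwise bs (fun x => x))
      (((PySem.List.sorted_perm as _ false).trans h).trans (PySem.List.sorted_perm bs _ false).symm)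

-- ===== VERDICT (by name: the statement is the Claim_ definition above) =====
theorem organizingContainers_spec : Claim_equal_organizingContainers := by
  intro container _ hpre
  unfold Spec_organizingContainers organizingContainers organizingContainers_alt
  simp only []
  rw [pvA_cols container, pvB_cols container hpre]
  have hlens : (pvColSums container).length ≤ (container.map (fun r => r.sum)).length := by
    simp [pvColSums]
  by_cases hp : (container.map (fun r => r.sum)).Perm (pvColSums container)
  · rw [if_pos ((pvSorted_eq_iff _ _).mpr hp),
        (pvMatch_possible container _).mpr hp.subperm]
  · rw [if_neg (fun hc => hp ((pvSorted_eq_iff _ _).mp hc))]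
    refine (pvMatch_impossible container _ (fun hc => hp ?_)).symm
    exact pvSubperm_perm _ _ ((pvMatch_possible container _).mp hc) hlens
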